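-- pv_equiv track=rewrite | github.com/yewonniy/algorithm | 네이버코테/2.py | solution
-- ===== SOURCE A (Python) =====
-- def solution(blocks):  # blocks는 n개의 블럭의 높이
--     # 두 블럭이 인접해있어야 하고, 높이가 같거나, 더 높은 블럭으로만 점프 가능.
--     res = 0
--     for i in range(len(blocks)):
--         # x 를 시작 블럭으로 생각하기
--         left = i
--         right = i
--         while True:
--             l, r = False, False
--             if left - 1 < 0 and right + 1 >= len(blocks):
--                 break
--             if left - 1 >= 0 and blocks[left] <= blocks[left - 1]:
--                 left = left - 1
--                 l = True # 움직였다. 가능성 있다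
--             if right + 1 < len(blocks) and blocks[right] <= blocks[right+1]:
--                 right = right + 1
--                 r = True
--             if not l and not r:
--                 break
--         res = max(res, right - left + 1)
--     return res
-- ===== SOURCE B (Python) =====
-- def solution(blocks):
--     # O(n): left/right reach via two linear recurrences instead of expanding from every start.
--     n = len(blocks)
--     down = [1] * n  # down[i] = length of the non-increasing run ending at i (reach to the left)
--     for i in range(1, n):
--         if blocks[i - 1] >= blocks[i]:
--             down[i] = down[i - 1] + 1
--     up = [1] * n    # up[i] = length of the non-decreasing run starting at i (reach to the right)
--     for i in range(n - 2, -1, -1):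
--         if blocks[i + 1] >= blocks[i]:
--             up[i] = up[i + 1] + 1
--     best = 0
--     for i in range(n):
--         best = max(best, down[i] + up[i] - 1)
--     return best
-- ===== Notes on version B (the rewrite author's own statement) =====
-- stated objective: faster
-- what changed: Replaced the per-start bidirectional while-loop expansion (quadratic) with two linear recurrences computing left-reach (down) and right-reach (up) run lengths, combined in one final pass.
import Mathlib
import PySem

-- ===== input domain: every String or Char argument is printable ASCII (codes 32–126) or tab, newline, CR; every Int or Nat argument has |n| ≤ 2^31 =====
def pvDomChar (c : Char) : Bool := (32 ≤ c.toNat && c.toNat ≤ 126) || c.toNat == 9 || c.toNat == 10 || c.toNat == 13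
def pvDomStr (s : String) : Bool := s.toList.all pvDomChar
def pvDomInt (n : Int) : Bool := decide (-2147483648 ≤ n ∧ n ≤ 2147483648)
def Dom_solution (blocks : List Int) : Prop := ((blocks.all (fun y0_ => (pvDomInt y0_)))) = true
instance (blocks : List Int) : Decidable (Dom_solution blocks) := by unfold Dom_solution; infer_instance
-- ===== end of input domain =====

-- B replaces A's per-start O(n^2) while-loop expansion by two O(n) reach recurrences (return value only; no mutation involved).

-- ===== PORT A =====
-- blocks[i] for an index the loop keeps in range (0 ≤ i < len): pyGet? then getD, exact there
def pyAt (blocks : List Int) (i : Int) : Int := (PySem.List.pyGet? blocks i).getD 0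

-- the 'while True' loop of A, step for step; terminates because left decreases or right increases
def solLoop (blocks : List Int) (left right : Int) : Int × Int :=
  if h0 : left - 1 < 0 ∧ right + 1 ≥ (blocks.length : Int) then (left, right)
  else
    if h1 : left - 1 ≥ 0 ∧ pyAt blocks left ≤ pyAt blocks (left - 1) then
      if h2 : right + 1 < (blocks.length : Int) ∧ pyAt blocks right ≤ pyAt blocks (right + 1) then
        solLoop blocks (left - 1) (right + 1)
      else
        solLoop blocks (left - 1) right
    else
      if h2 : right + 1 < (blocks.length : Int) ∧ pyAt blocks right ≤ pyAt blocks (right + 1) then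
        solLoop blocks left (right + 1)
      else (left, right)
termination_by left.toNat + ((blocks.length : Int) - right).toNat
decreasing_by all_goals omega

def solution (blocks : List Int) : Int :=
  (PySem.List.pyRange 0 (blocks.length : Int) 1).foldl
    (fun res i =>
      let p := solLoop blocks i i
      max res (p.2 - p.1 + 1)) 0

-- ===== PORT B =====
-- down[i] of Source B: length of the non-increasing run ending at i (filled left to right)
def downAt (blocks : List Int) : Nat → Int
  | 0 => 1
  | i + 1 => if pyAt blocks (i : Int) ≥ pyAt blocks ((i : Int) + 1) then downAt blocks i + 1 else 1

-- up[i] of Source B: length of the non-decreasing run starting at i (filled right to left)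
def upAt (blocks : List Int) (i : Nat) : Int :=
  if i + 1 < blocks.length then
    if pyAt blocks ((i : Int) + 1) ≥ pyAt blocks (i : Int) then upAt blocks (i + 1) + 1 else 1
  else 1
termination_by blocks.length - i

def solution_alt (blocks : List Int) : Int :=
  (List.range blocks.length).foldl
    (fun best i => max best (downAt blocks i + upAt blocks i - 1)) 0

-- ===== PRECONDITION & SPEC =====
def Spec_solution (blocks : List Int) (out : Int) : Prop := out = solution_alt blocks
instance (blocks : List Int) (out : Int) : Decidable (Spec_solution blocks out) := by unfold Spec_solution; infer_instance

-- ===== CLAIM (what is proved, stated in full; the proofs are below) =====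
def Claim_equal_solution : Prop := ∀ (blocks : List Int), Dom_solution blocks → Spec_solution blocks (solution blocks)

-- ===== LEMMAS AND PROOFS =====
-- final left endpoint reached from l, and final right endpoint reached from r
def lFin (blocks : List Int) (l : Int) : Int := l - (downAt blocks l.toNat - 1)
def rFin (blocks : List Int) (r : Int) : Int := r + (upAt blocks r.toNat - 1)

theorem lFin_step (blocks : List Int) (l : Int) (hl : l - 1 ≥ 0)
    (h : pyAt blocks l ≤ pyAt blocks (l - 1)) : lFin blocks (l - 1) = lFin blocks l := by
  have h1 : l.toNat = (l - 1).toNat + 1 := by omega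
  have hc : (((l - 1).toNat : Int)) = l - 1 := by omega
  have hc1 : l - 1 + 1 = l := by omega
  simp only [lFin, h1, downAt, hc, hc1, ge_iff_le, if_pos h]
  omega

theorem lFin_stop (blocks : List Int) (l : Int) (h0 : 0 ≤ l)
    (h : ¬ (l - 1 ≥ 0 ∧ pyAt blocks l ≤ pyAt blocks (l - 1))) : lFin blocks l = l := by
  by_cases hz : l = 0
  · subst hz; simp [lFin, downAt]
  · have h1 : l.toNat = (l - 1).toNat + 1 := by omega
    have hc : (((l - 1).toNat : Int)) = l - 1 := by omega
    have hc1 : l - 1 + 1 = l := by omega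
    have hn : ¬ pyAt blocks l ≤ pyAt blocks (l - 1) := by
      intro hcon; exact h ⟨by omega, hcon⟩
    simp only [lFin, h1, downAt, hc, hc1, ge_iff_le, if_neg hn]
    omega

theorem rFin_step (blocks : List Int) (r : Int) (h0 : 0 ≤ r) (hr : r + 1 < (blocks.length : Int))
    (h : pyAt blocks r ≤ pyAt blocks (r + 1)) : rFin blocks (r + 1) = rFin blocks r := by
  have h1 : (r + 1).toNat = r.toNat + 1 := by omega
  have hc : ((r.toNat : Int)) = r := by omega
  have hlt : r.toNat + 1 < blocks.length := by omega
  rw [rFin, rFin, h1]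
  nth_rewrite 2 [upAt]
  simp only [hc, ge_iff_le]
  rw [if_pos hlt, if_pos h]
  omega

theorem rFin_stop (blocks : List Int) (r : Int) (h0 : 0 ≤ r)
    (h : ¬ (r + 1 < (blocks.length : Int) ∧ pyAt blocks r ≤ pyAt blocks (r + 1))) : rFin blocks r = r := by
  have hc : ((r.toNat : Int)) = r := by omega
  rw [rFin, upAt]
  by_cases hlt : r.toNat + 1 < blocks.length
  · have hn : ¬ pyAt blocks r ≤ pyAt blocks (r + 1) := by
      intro hcon; exact h ⟨by omega, hcon⟩
    simp only [hc, ge_iff_le, if_pos hlt, if_neg hn]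
    omega
  · simp only [if_neg hlt]
    omega

theorem solLoop_eq (blocks : List Int) (left right : Int) (hl : 0 ≤ left)
    (hr : 0 ≤ right) :
    solLoop blocks left right = (lFin blocks left, rFin blocks right) := by
  rw [solLoop]
  split_ifs with h0 h1 h2 h2
  · rw [lFin_stop blocks left hl (fun hc => absurd hc.1 (by omega)),
        rFin_stop blocks right hr (fun hc => absurd hc.1 (by omega))]
  · rw [solLoop_eq blocks (left - 1) (right + 1) (by omega) (by omega),
        lFin_step blocks left h1.1 h1.2, rFin_step blocks right hr h2.1 h2.2]
  · rw [solLoop_eq blocks (left - 1) right (by omega) hr,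
        lFin_step blocks left h1.1 h1.2]
  · rw [solLoop_eq blocks left (right + 1) hl (by omega),
        rFin_step blocks right hr h2.1 h2.2]
  · rw [lFin_stop blocks left hl h1, rFin_stop blocks right hr h2]
termination_by left.toNat + ((blocks.length : Int) - right).toNat
decreasing_by all_goals omega

theorem solution_eq (blocks : List Int) : solution blocks = solution_alt blocks := by
  unfold solution solution_alt
  rw [PySem.List.pyRange_one]
  have hn : (((blocks.length : Int)) - 0).toNat = blocks.length := by omega
  rw [hn, List.foldl_map]
  apply PySem.List.foldl_congr_mem
  intro res k hk
  rw [solLoop_eq blocks (0 + (k : Int)) (0 + (k : Int)) (by omega) (by omega)]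
  have hc : ((0 : Int) + (k : Int)).toNat = k := by omega
  simp only [lFin, rFin, hc]
  congr 1
  omega

-- ===== VERDICT (by name: the statement is the Claim_ definition above) =====
theorem solution_spec : Claim_equal_solution := by
  intro blocks _
  unfold Spec_solution
  exact solution_eq blocks
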